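-- pv_equiv track=rewrite | github.com/Caizoo/Sudoku_Genetic | test_ea_functions.py | fitness_part
-- ===== SOURCE A (Python) =====
-- def fitness_part(part,incrementValue):
--     part_fitness = 0
--     for ind in part:
--         row = list(ind)
--         row.sort()
--         for i in range(len(row)-1):
--             if(row[i]==row[i+1]):
--                 part_fitness += incrementValue
--     return part_fitness
-- ===== SOURCE B (Python) =====
-- def fitness_part(part, incrementValue):
--     # Per row, #adjacent-equal-pairs after sorting == len(row) - #distinct values.
--     return incrementValue * sum(len(ind) - len(set(ind)) for ind in part)
-- ===== Notes on version B (the rewrite author's own statement) =====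
-- stated objective: simpler
-- what changed: Replaces per-row sort plus adjacent-pair scan with a one-line closed form: each row contributes incrementValue * (len(row) - number of distinct values), computed via set() with no sorting.
import Mathlib
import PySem

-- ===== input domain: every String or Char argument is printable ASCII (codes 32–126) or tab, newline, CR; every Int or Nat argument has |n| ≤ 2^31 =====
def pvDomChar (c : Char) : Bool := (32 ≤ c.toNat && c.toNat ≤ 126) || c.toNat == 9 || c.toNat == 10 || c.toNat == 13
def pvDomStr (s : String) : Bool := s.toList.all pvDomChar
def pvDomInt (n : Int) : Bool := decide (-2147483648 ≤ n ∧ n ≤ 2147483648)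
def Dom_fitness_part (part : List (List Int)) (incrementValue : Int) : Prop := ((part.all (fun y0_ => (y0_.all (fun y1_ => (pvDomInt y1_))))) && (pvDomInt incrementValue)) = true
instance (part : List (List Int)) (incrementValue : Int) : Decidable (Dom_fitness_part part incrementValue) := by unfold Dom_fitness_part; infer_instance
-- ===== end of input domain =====

-- B replaces A's per-row sort + adjacent-pair scan with the closed form
-- incrementValue * (len(row) - #distinct values), summed over rows (simpler, no sorting).


-- ===== PORT A =====
-- for ind in part: row = sorted(ind); for i in range(len(row)-1): if row[i]==row[i+1]: part_fitness += incrementValue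
def fitness_part (part : List (List Int)) (incrementValue : Int) : Int :=
  part.foldl (fun part_fitness ind =>
    let row := PySem.List.sorted ind (fun x => x) false
    (PySem.List.pyRange 0 ((row.length : Int) - 1) 1).foldl (fun acc i =>
      if PySem.List.pyGetD row i 0 = PySem.List.pyGetD row (i + 1) 0
      then acc + incrementValue else acc) part_fitness) 0

-- ===== PORT B =====
-- incrementValue * sum(len(ind) - len(set(ind)) for ind in part)
def fitness_part_alt (part : List (List Int)) (incrementValue : Int) : Int :=
  incrementValue *
    (part.map (fun ind => (ind.length : Int) - ((PySem.Set.ofList ind).length : Int))).sum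

-- ===== PRECONDITION & SPEC =====
def Spec_fitness_part (part : List (List Int)) (incrementValue : Int) (out : Int) : Prop := out = fitness_part_alt part incrementValue
instance (part : List (List Int)) (incrementValue : Int) (out : Int) : Decidable (Spec_fitness_part part incrementValue out) := by unfold Spec_fitness_part; infer_instance

-- ===== CLAIM (what is proved, stated in full; the proofs are below) =====
def Claim_equal_fitness_part : Prop := ∀ (part : List (List Int)) (incrementValue : Int), Dom_fitness_part part incrementValue → Spec_fitness_part part incrementValue (fitness_part part incrementValue)

-- ===== LEMMAS AND PROOFS =====

/-- Number of adjacent equal pairs, as an Int. -/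
def adjEq : List Int → Int
  | a :: b :: t => (if a = b then 1 else 0) + adjEq (b :: t)
  | _ => 0

/-- The sum A's inner loop computes over `range(len s - 1)`, expressed structurally. -/
lemma sum_adj (inc : Int) (s : List Int) :
    ((List.range (s.length - 1)).map
      (fun k => if s.getD k 0 = s.getD (k + 1) 0 then inc else 0)).sum = inc * adjEq s := by
  induction s with
  | nil => simp [adjEq]
  | cons a t ih =>
    cases t with
    | nil => simp [adjEq]
    | cons b u =>
      rw [show (a :: b :: u).length - 1 = ((b :: u).length - 1) + 1 by simp,
          List.range_succ_eq_map]
      simp only [List.map_cons, List.map_map, List.sum_cons]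
      have : ((List.range ((b :: u).length - 1)).map
          ((fun k => if (a :: b :: u).getD k 0 = (a :: b :: u).getD (k + 1) 0 then inc else 0)
            ∘ Nat.succ)).sum
          = ((List.range ((b :: u).length - 1)).map
            (fun k => if (b :: u).getD k 0 = (b :: u).getD (k + 1) 0 then inc else 0)).sum := by
        congr 1
      rw [this, ih, adjEq]
      by_cases hab : a = b <;> simp [hab, mul_add]

/-- A's inner loop on a row equals `acc + inc * adjEq row`. -/
lemma inner_loop (inc acc : Int) (s : List Int) :
    (PySem.List.pyRange 0 ((s.length : Int) - 1) 1).foldl (fun a i =>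
      if PySem.List.pyGetD s i 0 = PySem.List.pyGetD s (i + 1) 0 then a + inc else a) acc
    = acc + inc * adjEq s := by
  cases s with
  | nil => simp [PySem.List.pyRange, adjEq]
  | cons x t =>
    have hlen : ((x :: t).length : Int) - 1 = ((t.length : Nat) : Int) := by
      simp
    rw [hlen, PySem.List.pyRange_zero_natCast]
    have hbody : ∀ (a : Int) (i : Int),
        (if PySem.List.pyGetD (x :: t) i 0 = PySem.List.pyGetD (x :: t) (i + 1) 0
          then a + inc else a)
        = a + (if PySem.List.pyGetD (x :: t) i 0 = PySem.List.pyGetD (x :: t) (i + 1) 0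
          then inc else 0) := by
      intro a i
      by_cases hc : PySem.List.pyGetD (x :: t) i 0 = PySem.List.pyGetD (x :: t) (i + 1) 0 <;>
        simp [hc]
    calc ((List.range t.length).map (Nat.cast : Nat → Int)).foldl (fun a i =>
          if PySem.List.pyGetD (x :: t) i 0 = PySem.List.pyGetD (x :: t) (i + 1) 0
          then a + inc else a) acc
        = ((List.range t.length).map (Nat.cast : Nat → Int)).foldl (fun a i =>
            a + (if PySem.List.pyGetD (x :: t) i 0 = PySem.List.pyGetD (x :: t) (i + 1) 0
              then inc else 0)) acc := by
          congr 1; funext a i; exact hbody a i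
      _ = acc + (((List.range t.length).map (Nat.cast : Nat → Int)).map (fun i =>
            if PySem.List.pyGetD (x :: t) i 0 = PySem.List.pyGetD (x :: t) (i + 1) 0
              then inc else 0)).sum := by
          rw [PySem.List.foldl_add]
      _ = acc + inc * adjEq (x :: t) := by
          rw [List.map_map]
          have hm : ((List.range t.length).map ((fun i =>
              if PySem.List.pyGetD (x :: t) i 0 = PySem.List.pyGetD (x :: t) (i + 1) 0
                then inc else 0) ∘ (Nat.cast : Nat → Int)))
              = ((List.range t.length).map (fun k =>
                if (x :: t).getD k 0 = (x :: t).getD (k + 1) 0 then inc else 0)) := by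
            apply List.map_congr_left
            intro k _
            simp only [Function.comp]
            have h1 : PySem.List.pyGetD (x :: t) ((k : Int)) 0 = (x :: t).getD k 0 :=
              PySem.List.pyGetD_natCast ..
            have h2 : PySem.List.pyGetD (x :: t) ((k : Int) + 1) 0 = (x :: t).getD (k + 1) 0 := by
              have : ((k : Int) + 1) = ((k + 1 : Nat) : Int) := by push_cast; ring
              rw [this]; exact PySem.List.pyGetD_natCast ..
            rw [h1, h2]
          rw [hm]
          have : t.length = (x :: t).length - 1 := by simp
          rw [this, sum_adj]

/-- For a weakly increasing list, adjacent equal pairs = length − #distinct. -/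
lemma adjEq_sorted (l : List Int) (h : l.Pairwise (· ≤ ·)) :
    adjEq l = (l.length : Int) - (l.toFinset.card : Int) := by
  induction l with
  | nil => simp [adjEq]
  | cons a t ih =>
    cases t with
    | nil => simp [adjEq]
    | cons b u =>
      have hpair := h
      rw [List.pairwise_cons] at hpair
      obtain ⟨hale, htail⟩ := hpair
      by_cases hab : a = b
      · have hmem : a ∈ (b :: u).toFinset := by
          rw [List.mem_toFinset]; exact List.mem_cons.mpr (Or.inl hab)
        rw [adjEq, if_pos hab, ih htail]
        have : (a :: b :: u).toFinset = (b :: u).toFinset := by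
          rw [List.toFinset_cons, Finset.insert_eq_self.mpr hmem]
        rw [this]
        simp; ring
      · have hnotmem : a ∉ (b :: u) := by
          intro hmem
          rcases List.mem_cons.mp hmem with h1 | h1
          · exact hab h1
          · have hb := List.pairwise_cons.mp htail
            have : b ≤ a := hb.1 a h1
            have : a < b := lt_of_le_of_ne (hale b (List.mem_cons_self)) hab
            omega
        rw [adjEq, if_neg hab, ih htail]
        have : (a :: b :: u).toFinset = insert a (b :: u).toFinset := by
          simp [List.toFinset_cons]
        rw [this, Finset.card_insert_of_notMem (by simpa using hnotmem)]
        simp only [List.length_cons]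
        push_cast; ring
      
/-- Per-row value: A's count on the sorted row equals B's closed form. -/
lemma row_eq (ind : List Int) :
    adjEq (PySem.List.sorted ind (fun x => x) false)
      = (ind.length : Int) - ((PySem.Set.ofList ind).length : Int) := by
  have hs := PySem.List.sorted_pairwise (xs := ind) (key := fun x => x)
  have hperm := PySem.List.sorted_perm (xs := ind) (key := fun x => x) (rev := false)
  rw [adjEq_sorted _ (by simpa using hs), hperm.length_eq, List.toFinset_eq_of_perm _ _ hperm]
  congr 2
  -- (ofList ind).length = ind.toFinset.card
  have hnd : (PySem.Set.ofList ind).Nodup := PySem.Set.nodup_ofList ind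
  have hfs : (PySem.Set.ofList ind).toFinset = ind.toFinset := by
    ext x; simp [List.mem_toFinset, PySem.Set.mem_ofList]
  rw [← hfs, List.toFinset_card_of_nodup hnd]

/-- A's outer loop with a running accumulator. -/
lemma outer_loop (part : List (List Int)) (inc acc : Int) :
    part.foldl (fun part_fitness ind =>
      (PySem.List.pyRange 0 (((PySem.List.sorted ind (fun x => x) false).length : Int) - 1) 1).foldl
        (fun a i =>
          if PySem.List.pyGetD (PySem.List.sorted ind (fun x => x) false) i 0
              = PySem.List.pyGetD (PySem.List.sorted ind (fun x => x) false) (i + 1) 0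
          then a + inc else a) part_fitness) acc
    = acc + inc * (part.map (fun ind => (ind.length : Int) - ((PySem.Set.ofList ind).length : Int))).sum := by
  induction part generalizing acc with
  | nil => simp
  | cons ind rest ih =>
    rw [List.foldl_cons, ih, inner_loop, row_eq]
    simp [mul_add]; ring

-- ===== VERDICT (by name: the statement is the Claim_ definition above) =====
theorem fitness_part_spec : Claim_equal_fitness_part := by
  intro part inc _
  unfold Spec_fitness_part fitness_part fitness_part_alt
  simpa using outer_loop part inc 0
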